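-- pv_equiv track=rewrite | github.com/SIMPPOD/SIMPPOD | SIMPPOD 2.0/Código/Main.py | monta_perfil_total
-- ===== SOURCE A (Python) =====
-- def monta_perfil_total(perfil_total):
--     if len(perfil_total[0]) > 1:
--         # Inicializando a variável para armazenar o último valor da primeira sublista
--         ultimo_valor_sublista_anterior = perfil_total[0][-1]
--
--         # Aplanando a lista de listas em um único vetor e somando os valores
--         vetor = []
--
--         for i, sublist in enumerate(perfil_total):
--             if i == 0:
--                 vetor.extend(sublist)
--             else:
--                 # Somando elementos da sublista com o último valor da lista anterior
--                 sublist = [elemento + ultimo_valor_sublista_anterior for elemento in sublist]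
--
--                 # Estendendo o vetor com a sublista resultante
--                 vetor.extend(sublist)
--
--             # Atualizando o último valor da lista anterior, exceto para a última sublista
--             if i != len(perfil_total) - 1:
--                 ultimo_valor_sublista_anterior = sublist[-1]
--         return vetor
--     else: return perfil_total[0]
-- ===== SOURCE B (Python) =====
-- def monta_perfil_total(perfil_total):
--     first = perfil_total[0]
--     if len(first) <= 1:
--         return first
--     return _dc(perfil_total)
--
-- def _dc(lists):
--     # Divide and conquer: flatten each half independently, then shift the whole
--     # flattened right half by the last element of the flattened left half.
--     if len(lists) == 1:
--         return lists[0]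
--     mid = len(lists) // 2
--     left = _dc(lists[:mid])
--     right = _dc(lists[mid:])
--     return left + [e + left[-1] for e in right]
-- ===== Notes on version B (the rewrite author's own statement) =====
-- stated objective: alternative
-- what changed: B replaces A's single forward pass with a mutated running offset by divide and conquer: it flattens each half of the list recursively and then shifts the whole flattened right half by the last element of the flattened left half.
import Mathlib
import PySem

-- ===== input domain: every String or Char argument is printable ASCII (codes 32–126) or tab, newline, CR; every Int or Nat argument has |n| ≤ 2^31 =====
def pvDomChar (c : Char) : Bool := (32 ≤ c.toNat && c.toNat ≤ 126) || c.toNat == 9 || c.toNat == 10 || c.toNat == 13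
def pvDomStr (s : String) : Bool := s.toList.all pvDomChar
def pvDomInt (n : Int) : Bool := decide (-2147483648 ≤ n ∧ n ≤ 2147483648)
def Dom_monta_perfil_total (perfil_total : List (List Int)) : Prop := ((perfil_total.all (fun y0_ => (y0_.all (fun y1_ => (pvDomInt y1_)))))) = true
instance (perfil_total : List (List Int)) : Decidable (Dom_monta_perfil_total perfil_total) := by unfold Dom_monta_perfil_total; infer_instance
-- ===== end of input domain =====

-- B replaces A's single forward pass with a running offset by divide and conquer:
-- flatten each half recursively, then shift the whole flattened right half by the
-- flattened left half's last element; objective: alternative (not faster).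

-- ===== PORT A =====
-- one loop step of A's for-loop; state = (ultimo_valor_sublista_anterior, vetor)
def montaStep (n : Nat) (st : Int × List Int) (p : Int × List Int) : Int × List Int :=
  let sublist := if p.1 = 0 then p.2 else p.2.map (fun e => e + st.1)
  let vetor := st.2 ++ sublist
  -- sublist[-1]: Python raises IndexError on an empty non-final sublist (excluded by Pre_); .getD 0 is never the value used inside Pre_
  let ultimo := if p.1 ≠ (n : Int) - 1 then (PySem.List.pyGet? sublist (-1)).getD 0 else st.1
  (ultimo, vetor)

def monta_perfil_total (perfil_total : List (List Int)) : List Int :=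
  match PySem.List.pyGet? perfil_total 0 with
  | none => []  -- perfil_total[0] raises IndexError on []; excluded by Pre_
  | some first =>
    if 1 < first.length then
      ((PySem.List.enumerate perfil_total 0).foldl (montaStep perfil_total.length)
        ((PySem.List.pyGet? first (-1)).getD 0, [])).2
    else first

-- ===== PORT B =====
-- Source B's _dc; the [] case is unreachable from the entry point (Python would recurse forever)
def pvDc : List (List Int) → List Int
  | [] => []
  | [s] => s
  | a :: b :: t =>
    let mid := (a :: b :: t).length / 2
    let left := pvDc ((a :: b :: t).take mid)
    let right := pvDc ((a :: b :: t).drop mid)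
    -- left[-1]: Python raises IndexError when the flattened left half is empty (outside Pre_)
    left ++ right.map (fun e => e + (PySem.List.pyGet? left (-1)).getD 0)
  termination_by xs => xs.length
  decreasing_by all_goals simp [List.length_take]; omega

def monta_perfil_total_alt (perfil_total : List (List Int)) : List Int :=
  match PySem.List.pyGet? perfil_total 0 with
  | none => []  -- perfil_total[0] raises IndexError on []; excluded by Pre_
  | some first =>
    if first.length ≤ 1 then first
    else pvDc perfil_total

-- ===== PRECONDITION & SPEC =====
-- Pre_ excludes exactly the inputs on which Python A raises: the empty list
-- (perfil_total[0] → IndexError) and, when the flattening branch is taken, an empty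
-- non-final sublist (sublist[-1] → IndexError).
def Pre_monta_perfil_total (perfil_total : List (List Int)) : Prop :=
  perfil_total ≠ [] ∧
    (1 < (perfil_total.headI).length → ∀ s ∈ perfil_total.dropLast, s ≠ [])
instance (perfil_total : List (List Int)) : Decidable (Pre_monta_perfil_total perfil_total) := by
  unfold Pre_monta_perfil_total; infer_instance

def pvWitness_monta_perfil_total : List (List Int) := [[1, 2], [3], [4, 5]]

def Spec_monta_perfil_total (perfil_total : List (List Int)) (out : List Int) : Prop := out = monta_perfil_total_alt perfil_total
instance (perfil_total : List (List Int)) (out : List Int) : Decidable (Spec_monta_perfil_total perfil_total out) := by unfold Spec_monta_perfil_total; infer_instance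

-- ===== CLAIM (what is proved, stated in full; the proofs are below) =====
def Claim_equal_monta_perfil_total : Prop := ∀ (perfil_total : List (List Int)), Dom_monta_perfil_total perfil_total → Pre_monta_perfil_total perfil_total → Spec_monta_perfil_total perfil_total (monta_perfil_total perfil_total)

-- ===== LEMMAS AND PROOFS =====

-- last element with default 0 (total version of s[-1], as both ports use it)
def lastD (s : List Int) : Int := (PySem.List.pyGet? s (-1)).getD 0

-- common spec: flatten with a running offset
def goSpec : Int → List (List Int) → List Int
  | _, [] => []
  | off, s :: rest => s.map (fun e => e + off) ++ goSpec (off + lastD s) rest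

def sumLast : List (List Int) → Int
  | [] => 0
  | s :: t => lastD s + sumLast t

lemma lastD_map_add (s : List Int) (h : s ≠ []) (c : Int) :
    lastD (s.map (fun e => e + c)) = lastD s + c := by
  simp [lastD, PySem.List.pyGet?_neg_one, List.getLast?_map,
        List.getLast?_eq_some_getLast h]

lemma lemTail (n : Nat) (rest : List (List Int)) : ∀ (j : Int) (ult : Int) (vet : List Int),
    0 < j → j + rest.length = (n : Int) →
    (∀ s ∈ rest.dropLast, s ≠ []) →
    ((PySem.List.enumerate rest j).foldl (montaStep n) (ult, vet)).2 = vet ++ goSpec ult rest := by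
  induction rest with
  | nil => intro j ult vet _ _ _; simp [PySem.List.enumerate_nil, goSpec]
  | cons s rest ih =>
    intro j ult vet hj hlen hne
    rw [PySem.List.enumerate_cons]
    simp only [List.foldl_cons]
    have hj0 : j ≠ 0 := by omega
    cases rest with
    | nil =>
      have hjn : j = (n : Int) - 1 := by simp at hlen; omega
      simp [montaStep, hjn, PySem.List.enumerate_nil, goSpec]
      intro h; exfalso; omega
    | cons t ts =>
      have hjn : j ≠ (n : Int) - 1 := by simp at hlen; omega
      have hs : s ≠ [] := hne s (by simp)
      have hstep : montaStep n (ult, vet) (j, s)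
          = (ult + lastD s, vet ++ s.map (fun e => e + ult)) := by
        simp [montaStep, hj0, hjn]
        rw [show (PySem.List.pyGet? (s.map (fun e => e + ult)) (-1)).getD 0
              = lastD (s.map (fun e => e + ult)) from rfl, lastD_map_add s hs]
        omega
      rw [hstep, ih (j + 1) (ult + lastD s) (vet ++ s.map (fun e => e + ult))
            (by omega) (by simp at hlen ⊢; omega)
            (by intro x hx; exact hne x (by simp [List.dropLast_cons₂] at hx ⊢; tauto))]
      simp [goSpec]

lemma goSpec_ne_nil (L : List (List Int)) (s : List Int) (hs : s ≠ []) (o : Int) :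
    goSpec o (s :: L) ≠ [] := by
  simp [goSpec]
  intro h; exact absurd h hs

lemma goSpec_append (L R : List (List Int)) : ∀ o,
    goSpec o (L ++ R) = goSpec o L ++ goSpec (o + sumLast L) R := by
  induction L with
  | nil => intro o; simp [goSpec, sumLast]
  | cons s L ih => intro o; simp [goSpec, sumLast, ih, add_assoc]

lemma goSpec_getLast (L : List (List Int)) : L ≠ [] → (∀ s ∈ L, s ≠ []) → ∀ o,
    (goSpec o L).getLast? = some (o + sumLast L) := by
  induction L with
  | nil => intro h; exact absurd rfl h
  | cons s L ih =>
    intro _ hne o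
    have hs : s ≠ [] := hne s (by simp)
    cases L with
    | nil =>
      simp [goSpec, sumLast, List.getLast?_map, List.getLast?_eq_some_getLast hs, lastD,
            PySem.List.pyGet?_neg_one, add_comm]
    | cons t ts =>
      have ht : t ≠ [] := hne t (by simp)
      rw [show goSpec o (s :: t :: ts)
            = s.map (fun e => e + o) ++ goSpec (o + lastD s) (t :: ts) from rfl]
      rw [List.getLast?_append_of_ne_nil _ (goSpec_ne_nil ts t ht (o + lastD s))]
      rw [ih (by simp) (fun x hx => hne x (List.mem_cons_of_mem _ hx)) (o + lastD s)]
      simp [sumLast]; ring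

lemma mem_take_dropLast (xs : List (List Int)) (mid : Nat) (hmid : mid ≤ xs.length - 1) :
    ∀ s ∈ xs.take mid, s ∈ xs.dropLast := by
  intro s hs
  rw [List.dropLast_eq_take]
  have h : xs.take mid = (xs.take (xs.length - 1)).take mid := by
    rw [List.take_take, Nat.min_eq_left hmid]
  rw [h] at hs
  exact List.mem_of_mem_take hs

lemma mem_dropLast_drop (xs : List (List Int)) (mid : Nat) (hmid : mid < xs.length) :
    ∀ s ∈ (xs.drop mid).dropLast, s ∈ xs.dropLast := by
  intro s hs
  rw [List.dropLast_eq_take, List.take_drop] at hs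
  rw [List.dropLast_eq_take]
  have h1 : mid + ((xs.drop mid).length - 1) ≤ xs.length - 1 := by
    simp [List.length_drop]; omega
  have h2 : xs.take (mid + ((xs.drop mid).length - 1))
      = (xs.take (xs.length - 1)).take (mid + ((xs.drop mid).length - 1)) := by
    rw [List.take_take, Nat.min_eq_left h1]
  rw [h2] at hs
  exact List.mem_of_mem_take (List.mem_of_mem_drop hs)

lemma pvDc_eq : ∀ (n : Nat) (xs : List (List Int)), xs.length ≤ n → xs ≠ [] →
    (∀ s ∈ xs.dropLast, s ≠ []) → ∀ (o : Int),
    (pvDc xs).map (fun e => e + o) = goSpec o xs := by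
  intro n
  induction n with
  | zero =>
    intro xs h hne
    exact absurd (List.length_eq_zero_iff.mp (Nat.le_zero.mp h)) hne
  | succ n ih =>
    intro xs hlen hne hdl o
    match xs with
    | [s] => simp [pvDc, goSpec]
    | a :: b :: t =>
      have hunf : pvDc (a :: b :: t)
          = pvDc ((a :: b :: t).take ((a :: b :: t).length / 2)) ++
            (pvDc ((a :: b :: t).drop ((a :: b :: t).length / 2))).map
              (fun e => e + (PySem.List.pyGet?
                (pvDc ((a :: b :: t).take ((a :: b :: t).length / 2))) (-1)).getD 0) := by
        rw [pvDc]
      set xs := a :: b :: t with hxs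
      set mid := xs.length / 2 with hmid
      have hlen2 : 2 ≤ xs.length := by simp [hxs]
      have hmid1 : 1 ≤ mid := by rw [hmid]; omega
      have hmidlt : mid ≤ xs.length - 1 := by rw [hmid]; omega
      have hLlen : (xs.take mid).length ≤ n := by
        simp [List.length_take]; omega
      have hRlen : (xs.drop mid).length ≤ n := by
        simp [List.length_drop]; omega
      have hLne : xs.take mid ≠ [] := by
        intro h; have := congrArg List.length h
        simp [List.length_take] at this; omega
      have hRne : xs.drop mid ≠ [] := by
        intro h; have := congrArg List.length h
        simp at this; omega
      have hLmem : ∀ s ∈ xs.take mid, s ≠ [] :=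
        fun s hs => hdl s (mem_take_dropLast xs mid hmidlt s hs)
      have hLdl : ∀ s ∈ (xs.take mid).dropLast, s ≠ [] :=
        fun s hs => hLmem s (List.dropLast_subset _ hs)
      have hRdl : ∀ s ∈ (xs.drop mid).dropLast, s ≠ [] :=
        fun s hs => hdl s (mem_dropLast_drop xs mid (by omega) s hs)
      have hL0 : pvDc (xs.take mid) = goSpec 0 (xs.take mid) := by
        have := ih (xs.take mid) hLlen hLne hLdl 0
        rw [← this]; simp
      have hlast : (PySem.List.pyGet? (pvDc (xs.take mid)) (-1)).getD 0
          = sumLast (xs.take mid) := by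
        rw [hL0]
        simp [PySem.List.pyGet?_neg_one,
              goSpec_getLast (xs.take mid) hLne hLmem 0]
      have hgoal : goSpec o xs
          = goSpec o (xs.take mid) ++ goSpec (o + sumLast (xs.take mid)) (xs.drop mid) := by
        conv_lhs => rw [← List.take_append_drop mid xs]
        exact goSpec_append _ _ o
      rw [hunf, hgoal, List.map_append, List.map_map]
      congr 1
      · calc (pvDc (xs.take mid)).map (fun e => e + o)
            = (goSpec 0 (xs.take mid)).map (fun e => e + o) := by rw [hL0]
          _ = ((pvDc (xs.take mid)).map (fun e => e + (0:Int))).map (fun e => e + o) := by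
              rw [ih (xs.take mid) hLlen hLne hLdl 0]
          _ = (pvDc (xs.take mid)).map (fun e => e + o) := by
              rw [List.map_map]
              congr 1; funext e; simp
          _ = goSpec o (xs.take mid) := ih (xs.take mid) hLlen hLne hLdl o
      · have hcomp : ((fun e => e + o) ∘
            (fun e => e + (PySem.List.pyGet? (pvDc (xs.take mid)) (-1)).getD 0))
            = fun e => e + (o + sumLast (xs.take mid)) := by
          funext e
          simp [Function.comp, hlast]; ring
        rw [hcomp]
        exact ih (xs.drop mid) hRlen hRne hRdl (o + sumLast (xs.take mid))

lemma dropLast_tail_subset (s0 : List Int) (tail : List (List Int)) :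
    ∀ x ∈ tail.dropLast, x ∈ (s0 :: tail).dropLast := by
  cases tail with
  | nil => simp
  | cons t ts => intro x hx; rw [List.dropLast_cons₂]; exact List.mem_cons_of_mem _ hx

-- ===== VERDICT (by name: the statement is the Claim_ definition above) =====
theorem monta_perfil_total_spec : Claim_equal_monta_perfil_total := by
  intro pt _ hpre
  unfold Spec_monta_perfil_total
  obtain ⟨hne, hsub⟩ := hpre
  cases pt with
  | cons s0 tail =>
    by_cases hlen : 1 < s0.length
    · have hsub' : ∀ s ∈ (s0 :: tail).dropLast, s ≠ [] := hsub (by simpa using hlen)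
      -- A side
      have hA : monta_perfil_total (s0 :: tail) = s0 ++ goSpec (lastD s0) tail := by
        unfold monta_perfil_total
        rw [PySem.List.pyGet?_zero_cons]
        simp only [hlen, if_pos]
        rw [PySem.List.enumerate_cons]
        simp only [List.foldl_cons]
        have hstep0 : montaStep (s0 :: tail).length ((PySem.List.pyGet? s0 (-1)).getD 0, []) (0, s0)
            = (lastD s0, s0) := by
          simp [montaStep, lastD, ite_self]
        rw [hstep0]
        exact lemTail (s0 :: tail).length tail 1 (lastD s0) s0 (by omega)
          (by simp; omega)
          (fun x hx => hsub' x (dropLast_tail_subset s0 tail x hx))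
      -- B side
      have hB : monta_perfil_total_alt (s0 :: tail) = goSpec 0 (s0 :: tail) := by
        unfold monta_perfil_total_alt
        rw [PySem.List.pyGet?_zero_cons]
        simp only [show ¬ s0.length ≤ 1 from by omega, if_neg, not_false_iff]
        have := pvDc_eq (s0 :: tail).length (s0 :: tail) le_rfl (by simp) hsub' 0
        rw [← this]; simp
      rw [hA, hB]
      simp [goSpec]
    · simp [monta_perfil_total, monta_perfil_total_alt,
            hlen, show s0.length ≤ 1 from by omega]
  | nil => exact absurd rfl hne
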